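-- pv_equiv track=rewrite | github.com/RILAB/argprep | scripts/check_split_coverage.py | overlap_intervals
-- ===== SOURCE A (Python) =====
-- from typing import Dict, List, TextIO, Tuple
--
-- def merge_intervals(intervals: List[Tuple[int, int]]) -> List[Tuple[int, int]]:
--     # Coalesce overlapping/adjacent intervals to simplify coverage math.
--     if not intervals:
--         return []
--     intervals.sort(key=lambda x: (x[0], x[1]))
--     merged: List[Tuple[int, int]] = []
--     cur_s, cur_e = intervals[0]
--     for s, e in intervals[1:]:
--         if s <= cur_e:
--             cur_e = max(cur_e, e)
--         else:
--             merged.append((cur_s, cur_e))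
--             cur_s, cur_e = s, e
--     merged.append((cur_s, cur_e))
--     return merged
--
-- def overlap_intervals(
--     a: List[Tuple[int, int]], b: List[Tuple[int, int]]
-- ) -> List[Tuple[int, int]]:
--     # Return explicit overlap intervals for reporting.
--     i = j = 0
--     overlaps: List[Tuple[int, int]] = []
--     a = merge_intervals(a)
--     b = merge_intervals(b)
--     while i < len(a) and j < len(b):
--         a_s, a_e = a[i]
--         b_s, b_e = b[j]
--         if a_e <= b_s:
--             i += 1
--             continue
--         if b_e <= a_s:
--             j += 1
--             continue
--         start = max(a_s, b_s)
--         end = min(a_e, b_e)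
--         if end > start:
--             overlaps.append((start, end))
--         if a_e <= b_e:
--             i += 1
--         else:
--             j += 1
--     return overlaps
-- ===== SOURCE B (Python) =====
-- from typing import List, Tuple
--
-- def _merged(intervals: List[Tuple[int, int]]) -> List[Tuple[int, int]]:
--     # Sort in place (same observable mutation as A), then coalesce into out,
--     # extending the last emitted interval instead of carrying (cur_s, cur_e).
--     intervals.sort()
--     out: List[Tuple[int, int]] = []
--     for s, e in intervals:
--         if out and s <= out[-1][1]:
--             if e > out[-1][1]:
--                 out[-1] = (out[-1][0], e)
--         else:
--             out.append((s, e))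
--     return out
--
-- def overlap_intervals(
--     a: List[Tuple[int, int]], b: List[Tuple[int, int]]
-- ) -> List[Tuple[int, int]]:
--     # Merged lists are sorted with a gap between consecutive intervals, so the
--     # positive-length pairwise intersections, taken in order, are the overlaps.
--     ma = _merged(a)
--     mb = _merged(b)
--     return [
--         (max(a_s, b_s), min(a_e, b_e))
--         for a_s, a_e in ma
--         for b_s, b_e in mb
--         if min(a_e, b_e) > max(a_s, b_s)
--     ]
-- ===== Notes on version B (the rewrite author's own statement) =====
-- stated objective: simpler
-- what changed: The merge phase extends the last emitted interval instead of carrying (cur_s, cur_e) through the loop, and the index-based two-pointer sweep is replaced by a direct pairwise-intersection comprehension over the two merged lists (correct because merged lists are sorted with gaps, so only consecutive pairs can intersect).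
import Mathlib
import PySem

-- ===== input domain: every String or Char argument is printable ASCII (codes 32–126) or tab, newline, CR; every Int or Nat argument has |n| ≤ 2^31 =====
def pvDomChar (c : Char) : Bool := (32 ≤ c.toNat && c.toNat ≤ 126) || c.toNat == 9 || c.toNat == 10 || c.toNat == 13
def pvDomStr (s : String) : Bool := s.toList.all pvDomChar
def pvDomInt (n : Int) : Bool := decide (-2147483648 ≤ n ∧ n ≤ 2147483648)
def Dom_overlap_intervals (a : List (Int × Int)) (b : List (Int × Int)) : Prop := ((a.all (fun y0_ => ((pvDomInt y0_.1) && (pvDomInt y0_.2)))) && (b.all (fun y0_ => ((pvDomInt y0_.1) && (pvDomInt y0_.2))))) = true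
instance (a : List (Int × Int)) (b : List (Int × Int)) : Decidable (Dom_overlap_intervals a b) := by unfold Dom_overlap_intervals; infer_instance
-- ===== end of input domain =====

-- B replaces A's index-based two-pointer sweep by a merge that extends the last
-- emitted interval plus a direct pairwise-intersection comprehension over the two
-- merged lists (objective: simpler).  Both A and B sort the argument lists in
-- place in Python; the equivalence proved here is about the return value.

-- ===== PORT A =====
-- the for-loop of merge_intervals carrying (cur_s, cur_e); merged.append becomes cons
def mergeLoop : Int → Int → List (Int × Int) → List (Int × Int)
  | cs, ce, [] => [(cs, ce)]
  | cs, ce, (s, e) :: rest =>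
      if s ≤ ce then mergeLoop cs (max ce e) rest
      else (cs, ce) :: mergeLoop s e rest

-- intervals.sort(key=lambda x: (x[0], x[1])) is sorted2 by (fst, snd); '' if not intervals: return [] ''
def merge_intervals (intervals : List (Int × Int)) : List (Int × Int) :=
  match PySem.List.sorted2 intervals (fun x => x.1) (fun x => x.2) with
  | [] => []
  | (cs, ce) :: rest => mergeLoop cs ce rest

-- the while-loop over indices i, j, as structural recursion on the two suffixes
def ovLoop : List (Int × Int) → List (Int × Int) → List (Int × Int)
  | [], _ => []
  | _ :: _, [] => []
  | (a_s, a_e) :: ta, (b_s, b_e) :: tb =>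
      if a_e ≤ b_s then ovLoop ta ((b_s, b_e) :: tb)
      else if b_e ≤ a_s then ovLoop ((a_s, a_e) :: ta) tb
      else
        (if min a_e b_e > max a_s b_s then [(max a_s b_s, min a_e b_e)] else []) ++
        (if a_e ≤ b_e then ovLoop ta ((b_s, b_e) :: tb) else ovLoop ((a_s, a_e) :: ta) tb)
termination_by l1 l2 => l1.length + l2.length

def overlap_intervals (a : List (Int × Int)) (b : List (Int × Int)) : List (Int × Int) :=
  ovLoop (merge_intervals a) (merge_intervals b)

-- ===== PORT B =====
-- intervals.sort() on pairs of ints is the lexicographic sort = sorted2 by (fst, snd); exact.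
-- out[-1] is getLast?, ''out[-1] = (out[-1][0], e)'' is dropLast ++ [...]
def mergedAlt (intervals : List (Int × Int)) : List (Int × Int) :=
  (PySem.List.sorted2 intervals (fun x => x.1) (fun x => x.2)).foldl
    (fun out p =>
      match out.getLast? with
      | some l =>
          if p.1 ≤ l.2 then
            if p.2 > l.2 then out.dropLast ++ [(l.1, p.2)] else out
          else out ++ [p]
      | none => out ++ [p]) []

-- the comprehension's filter and element: (max(a_s,b_s), min(a_e,b_e)) if min > max
def pvInter (x y : Int × Int) : Option (Int × Int) :=
  if min x.2 y.2 > max x.1 y.1 then some (max x.1 y.1, min x.2 y.2) else none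

def overlap_intervals_alt (a : List (Int × Int)) (b : List (Int × Int)) : List (Int × Int) :=
  let ma := mergedAlt a
  let mb := mergedAlt b
  ma.flatMap fun x => mb.filterMap fun y => pvInter x y

-- ===== PRECONDITION & SPEC =====
def Spec_overlap_intervals (a : List (Int × Int)) (b : List (Int × Int)) (out : List (Int × Int)) : Prop := out = overlap_intervals_alt a b
instance (a : List (Int × Int)) (b : List (Int × Int)) (out : List (Int × Int)) : Decidable (Spec_overlap_intervals a b out) := by unfold Spec_overlap_intervals; infer_instance

-- ===== CLAIM (what is proved, stated in full; the proofs are below) =====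
def Claim_equal_overlap_intervals : Prop := ∀ (a : List (Int × Int)) (b : List (Int × Int)), Dom_overlap_intervals a b → Spec_overlap_intervals a b (overlap_intervals a b)

-- ===== LEMMAS AND PROOFS =====

-- the strict lexicographic order used by sorted2 on int pairs
def pvBefore (p q : Int × Int) : Bool :=
  decide (p.1 < q.1) || (!decide (q.1 < p.1) && decide (p.2 < q.2))

theorem pvBefore_asymm (p q : Int × Int) (h : pvBefore p q = true) : pvBefore q p = false := by
  simp [pvBefore] at *; omega

theorem pvBefore_trans (p q r : Int × Int) (h1 : pvBefore p q = true) (h2 : pvBefore q r = true) :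
    pvBefore p r = true := by
  simp [pvBefore] at *; omega

theorem insertBy_eq_nil (x : Int × Int) :
    PySem.List.insertBy pvBefore x [] = [x] := rfl

theorem insertBy_eq_cons (x y : Int × Int) (ys : List (Int × Int)) :
    PySem.List.insertBy pvBefore x (y :: ys) =
      if pvBefore x y then x :: y :: ys else y :: PySem.List.insertBy pvBefore x ys := rfl

-- inserting keeps "no later element strictly-before an earlier one"
theorem pairwise_insertBy (x : Int × Int) (ys : List (Int × Int))
    (h : ys.Pairwise (fun p q => pvBefore q p = false)) :
    (PySem.List.insertBy pvBefore x ys).Pairwise (fun p q => pvBefore q p = false) := by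
  induction ys with
  | nil => simp [insertBy_eq_nil]
  | cons y ys ih =>
    rw [List.pairwise_cons] at h
    rw [insertBy_eq_cons]
    by_cases hb : pvBefore x y = true
    · rw [if_pos hb]
      refine List.Pairwise.cons ?_ (List.Pairwise.cons h.1 h.2)
      intro z hz
      rw [List.mem_cons] at hz
      rcases hz with rfl | hz
      · exact pvBefore_asymm _ _ hb
      · -- pvBefore z x = false from pvBefore x y and pvBefore y z = false
        by_contra hc
        have hzx : pvBefore z x = true := by
          cases hzx : pvBefore z x with
          | false => exact absurd hzx hc
          | true => rfl
        have : pvBefore z y = true := pvBefore_trans _ _ _ hzx hb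
        have := h.1 z hz
        simp_all
    · rw [if_neg hb]
      refine List.Pairwise.cons ?_ (ih h.2)
      intro z hz
      rw [PySem.List.mem_insertBy] at hz
      rcases hz with rfl | hz
      · simpa using hb
      · exact h.1 z hz
theorem foldl_insertBy_pairwise (l : List (Int × Int)) (acc : List (Int × Int))
    (h : acc.Pairwise (fun p q => pvBefore q p = false)) :
    (l.foldl (fun acc x => PySem.List.insertBy pvBefore x acc) acc).Pairwise
      (fun p q => pvBefore q p = false) := by
  induction l generalizing acc with
  | nil => exact h
  | cons x rest ih => exact ih _ (pairwise_insertBy x acc h)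

theorem sorted2_pairwise_before (l : List (Int × Int)) :
    (PySem.List.sorted2 l (fun x => x.1) (fun x => x.2)).Pairwise
      (fun p q => pvBefore q p = false) := by
  have he : PySem.List.sorted2 l (fun x => x.1) (fun x => x.2) =
      l.foldl (fun acc x => PySem.List.insertBy pvBefore x acc) [] := rfl
  rw [he]
  exact foldl_insertBy_pairwise l [] (by simp)

-- consequence: first components are nondecreasing
theorem sorted2_pairwise_fst (l : List (Int × Int)) :
    (PySem.List.sorted2 l (fun x => x.1) (fun x => x.2)).Pairwise (fun p q => p.1 ≤ q.1) := by
  refine (sorted2_pairwise_before l).imp ?_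
  intro p q h
  simp [pvBefore] at h; omega

-- every first component produced by mergeLoop is ≥ cs
theorem mergeLoop_fst_le (l : List (Int × Int)) (cs ce : Int)
    (hall : ∀ x ∈ l, cs ≤ x.1) (hs : l.Pairwise (fun p q => p.1 ≤ q.1)) :
    ∀ q ∈ mergeLoop cs ce l, cs ≤ q.1 := by
  induction l generalizing cs ce with
  | nil =>
    intro q hq
    simp [mergeLoop] at hq
    simp [hq]
  | cons p rest ih =>
    obtain ⟨s, e⟩ := p
    rw [List.pairwise_cons] at hs
    have hcs : cs ≤ s := hall (s, e) (by simp)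
    intro q hq
    simp only [mergeLoop] at hq
    by_cases hle : s ≤ ce
    · rw [if_pos hle] at hq
      exact ih cs (max ce e) (fun x hx => hall x (List.mem_cons_of_mem _ hx)) hs.2 q hq
    · rw [if_neg hle] at hq
      rw [List.mem_cons] at hq
      rcases hq with rfl | hq
      · simp
      · have := ih s e (fun x hx => hs.1 x hx) hs.2 q hq
        omega

-- the gap invariant of merged lists
theorem mergeLoop_pairwise (l : List (Int × Int)) (cs ce : Int)
    (hall : ∀ x ∈ l, cs ≤ x.1) (hs : l.Pairwise (fun p q => p.1 ≤ q.1)) :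
    (mergeLoop cs ce l).Pairwise (fun p q => p.1 ≤ q.1 ∧ p.2 < q.1) := by
  induction l generalizing cs ce with
  | nil => simp [mergeLoop]
  | cons p rest ih =>
    obtain ⟨s, e⟩ := p
    rw [List.pairwise_cons] at hs
    have hcs : cs ≤ s := hall (s, e) (by simp)
    simp only [mergeLoop]
    by_cases hle : s ≤ ce
    · rw [if_pos hle]
      exact ih cs (max ce e) (fun x hx => hall x (List.mem_cons_of_mem _ hx)) hs.2
    · rw [if_neg hle]
      refine List.Pairwise.cons ?_ (ih s e (fun x hx => hs.1 x hx) hs.2)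
      intro q hq
      have h1 : s ≤ q.1 := mergeLoop_fst_le rest s e (fun x hx => hs.1 x hx) hs.2 q hq
      constructor <;> omega

theorem merge_pairwise (l : List (Int × Int)) :
    (merge_intervals l).Pairwise (fun p q => p.1 ≤ q.1 ∧ p.2 < q.1) := by
  unfold merge_intervals
  have hfst := sorted2_pairwise_fst l
  cases hsort : PySem.List.sorted2 l (fun x => x.1) (fun x => x.2) with
  | nil => simp
  | cons p rest =>
    obtain ⟨cs, ce⟩ := p
    rw [hsort, List.pairwise_cons] at hfst
    exact mergeLoop_pairwise rest cs ce (fun x hx => hfst.1 x hx) hfst.2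

-- B's fold equals A's carry loop
theorem mergedAlt_loop (l : List (Int × Int)) :
    ∀ (acc : List (Int × Int)) (cs ce : Int),
    l.foldl (fun out p =>
      match out.getLast? with
      | some la =>
          if p.1 ≤ la.2 then
            if p.2 > la.2 then out.dropLast ++ [(la.1, p.2)] else out
          else out ++ [p]
      | none => out ++ [p]) (acc ++ [(cs, ce)]) = acc ++ mergeLoop cs ce l := by
  intro acc cs ce
  induction l generalizing acc cs ce with
  | nil => simp [mergeLoop]
  | cons p rest ih =>
    obtain ⟨s, e⟩ := p
    rw [List.foldl_cons]
    simp only [List.getLast?_concat]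
    by_cases hle : s ≤ ce
    · rw [if_pos hle]
      by_cases hgt : e > ce
      · rw [if_pos hgt, List.dropLast_concat]
        have hmax : max ce e = e := by omega
        simp only [mergeLoop, if_pos hle, hmax]
        exact ih acc cs e
      · rw [if_neg hgt]
        have hmax : max ce e = ce := by omega
        simp only [mergeLoop, if_pos hle, hmax]
        exact ih acc cs ce
    · rw [if_neg hle]
      simp only [mergeLoop, if_neg hle]
      rw [ih (acc ++ [(cs, ce)]) s e]
      simp

theorem mergedAlt_eq (l : List (Int × Int)) : mergedAlt l = merge_intervals l := by
  unfold mergedAlt merge_intervals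
  cases hsort : PySem.List.sorted2 l (fun x => x.1) (fun x => x.2) with
  | nil => simp
  | cons p rest =>
    obtain ⟨cs, ce⟩ := p
    rw [List.foldl_cons]
    have h0 := mergedAlt_loop rest [] cs ce
    simpa using h0

theorem filterMap_cons_toList (f : Int × Int → Option (Int × Int)) (y : Int × Int)
    (tb : List (Int × Int)) :
    List.filterMap f (y :: tb) = (f y).toList ++ List.filterMap f tb := by
  cases h : f y <;> simp [h]

-- dropping the head of the inner list when it meets no row element
theorem flatMap_drop_head (l : List (Int × Int)) (y : Int × Int) (tb : List (Int × Int))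
    (h : ∀ x ∈ l, pvInter x y = none) :
    l.flatMap (fun x => List.filterMap (fun z => pvInter x z) (y :: tb)) =
    l.flatMap (fun x => List.filterMap (fun z => pvInter x z) tb) := by
  induction l with
  | nil => rfl
  | cons x l ih =>
    rw [List.flatMap_cons, List.flatMap_cons, filterMap_cons_toList,
      h x (by simp), ih (fun z hz => h z (List.mem_cons_of_mem _ hz))]
    rfl

-- the main lemma: on gap-sorted lists the two-pointer sweep is the pairwise product
theorem ovLoop_eq_prod (ma mb : List (Int × Int))
    (ha : ma.Pairwise (fun p q => p.1 ≤ q.1 ∧ p.2 < q.1))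
    (hb : mb.Pairwise (fun p q => p.1 ≤ q.1 ∧ p.2 < q.1)) :
    ovLoop ma mb = ma.flatMap (fun x => mb.filterMap (fun y => pvInter x y)) := by
  induction ma, mb using ovLoop.induct with
  | case1 mb => simp [ovLoop]
  | case2 x ta =>
    rw [show ovLoop (x :: ta) [] = [] by simp [ovLoop]]
    simp
  | case3 a_s a_e ta b_s b_e tb h1 ih =>
    rw [List.pairwise_cons] at ha
    rw [show ovLoop ((a_s, a_e) :: ta) ((b_s, b_e) :: tb) = ovLoop ta ((b_s, b_e) :: tb) by
      simp [ovLoop, h1]]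
    rw [List.flatMap_cons, ih ha.2 hb]
    have hrow : List.filterMap (fun y => pvInter (a_s, a_e) y) ((b_s, b_e) :: tb) = [] := by
      rw [List.filterMap_eq_nil_iff]
      intro y hy
      have hy1 : b_s ≤ y.1 := by
        rw [List.mem_cons] at hy
        rcases hy with rfl | hy
        · simp
        · exact ((List.pairwise_cons.mp hb).1 y hy).1
      have : ¬ min a_e y.2 > max a_s y.1 := by omega
      simp [pvInter, this]
    rw [hrow, List.nil_append]
  | case4 a_s a_e ta b_s b_e tb h1 h2 ih =>
    rw [List.pairwise_cons] at hb
    rw [show ovLoop ((a_s, a_e) :: ta) ((b_s, b_e) :: tb) = ovLoop ((a_s, a_e) :: ta) tb by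
      simp [ovLoop, h1, h2]]
    rw [ih ha hb.2]
    refine (flatMap_drop_head _ _ _ ?_).symm
    intro x hx
    have hx1 : a_s ≤ x.1 := by
      rw [List.mem_cons] at hx
      rcases hx with rfl | hx
      · simp
      · exact ((List.pairwise_cons.mp ha).1 x hx).1
    have : ¬ min x.2 b_e > max x.1 b_s := by omega
    simp [pvInter, this]
  | case5 a_s a_e ta b_s b_e tb h1 h2 ih1 ih2 =>
    have hal := List.pairwise_cons.mp ha
    have hbl := List.pairwise_cons.mp hb
    rw [show ovLoop ((a_s, a_e) :: ta) ((b_s, b_e) :: tb) =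
        (pvInter (a_s, a_e) (b_s, b_e)).toList ++
        (if a_e ≤ b_e then ovLoop ta ((b_s, b_e) :: tb) else ovLoop ((a_s, a_e) :: ta) tb) by
      rw [show ovLoop ((a_s, a_e) :: ta) ((b_s, b_e) :: tb) =
          (if min a_e b_e > max a_s b_s then [(max a_s b_s, min a_e b_e)] else []) ++
          (if a_e ≤ b_e then ovLoop ta ((b_s, b_e) :: tb) else ovLoop ((a_s, a_e) :: ta) tb) by
        simp [ovLoop, h1, h2]]
      by_cases hg : min a_e b_e > max a_s b_s <;> simp [pvInter, hg]]
    rw [List.flatMap_cons, filterMap_cons_toList]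
    by_cases hab : a_e ≤ b_e
    · rw [if_pos hab, ih1 hal.2 hb]
      have htb : List.filterMap (fun y => pvInter (a_s, a_e) y) tb = [] := by
        rw [List.filterMap_eq_nil_iff]
        intro y hy
        have hy1 : b_e < y.1 := (hbl.1 y hy).2
        have : ¬ min a_e y.2 > max a_s y.1 := by omega
        simp [pvInter, this]
      rw [htb, List.append_nil]
    · rw [if_neg hab, ih2 ha hbl.2]
      have hta : ta.flatMap (fun x => List.filterMap (fun y => pvInter x y) ((b_s, b_e) :: tb)) =
          ta.flatMap (fun x => List.filterMap (fun y => pvInter x y) tb) := by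
        refine flatMap_drop_head _ _ _ ?_
        intro x hx
        have hx1 : a_e < x.1 := (hal.1 x hx).2
        have : ¬ min x.2 b_e > max x.1 b_s := by omega
        simp [pvInter, this]
      rw [hta, List.flatMap_cons, List.append_assoc]

-- ===== VERDICT (by name: the statement is the Claim_ definition above) =====
theorem overlap_intervals_spec : Claim_equal_overlap_intervals := by
  intro a b _
  unfold Spec_overlap_intervals overlap_intervals overlap_intervals_alt
  rw [mergedAlt_eq, mergedAlt_eq]
  exact ovLoop_eq_prod _ _ (merge_pairwise a) (merge_pairwise b)
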